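-- pv_equiv track=rewrite | github.com/genropy/genro-toolbox | src/genro_toolbox/ascii_table.py | normalize_date_format
-- ===== SOURCE A (Python) =====
-- def normalize_date_format(fmt: str) -> str:
--     mapping = {
--         "yyyy": "%Y",
--         "yy": "%y",
--         "mm": "%m",
--         "dd": "%d",
--         "HH": "%H",
--         "MM": "%M",
--         "SS": "%S",
--     }
--     result = fmt
--     for k, v in mapping.items():
--         result = result.replace(k, v)
--     return result
-- ===== SOURCE B (Python) =====
-- def normalize_date_format(fmt: str) -> str:
--     out = []
--     i = 0
--     n = len(fmt)
--     while i < n: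
--         if fmt.startswith("yyyy", i):
--             out.append("%Y"); i += 4
--         elif fmt.startswith("yy", i):
--             out.append("%y"); i += 2
--         elif fmt.startswith("mm", i):
--             out.append("%m"); i += 2
--         elif fmt.startswith("dd", i):
--             out.append("%d"); i += 2
--         elif fmt.startswith("HH", i):
--             out.append("%H"); i += 2
--         elif fmt.startswith("MM", i):
--             out.append("%M"); i += 2
--         elif fmt.startswith("SS", i):
--             out.append("%S"); i += 2
--         else:
--             out.append(fmt[i]); i += 1
--     return "".join(out)
-- ===== Notes on version B (the rewrite author's own statement) =====
-- stated objective: alternative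
-- what changed: Replaced seven sequential whole-string .replace passes with one explicit left-to-right scanner that at each index tries the tokens longest-first and emits the strftime code or the literal character.
import Mathlib
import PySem

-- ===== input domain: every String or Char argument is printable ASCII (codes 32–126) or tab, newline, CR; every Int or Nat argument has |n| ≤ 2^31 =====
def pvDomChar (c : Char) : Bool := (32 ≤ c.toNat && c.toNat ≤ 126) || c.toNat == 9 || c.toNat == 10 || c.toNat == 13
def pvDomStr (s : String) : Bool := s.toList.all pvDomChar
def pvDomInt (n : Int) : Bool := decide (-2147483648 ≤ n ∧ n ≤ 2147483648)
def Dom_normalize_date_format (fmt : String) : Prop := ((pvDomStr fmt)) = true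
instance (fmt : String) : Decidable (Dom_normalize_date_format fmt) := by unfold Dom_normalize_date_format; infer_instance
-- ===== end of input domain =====

-- B replaces A's seven sequential whole-string replace passes by one left-to-right
-- longest-token-first scan; same output (objective: alternative single-pass algorithm).

-- ===== PORT A =====
def pvMapping : List (String × String) :=
  [("yyyy", "%Y"), ("yy", "%y"), ("mm", "%m"), ("dd", "%d"),
   ("HH", "%H"), ("MM", "%M"), ("SS", "%S")]

def normalize_date_format (fmt : String) : String :=
  pvMapping.foldl (fun result kv => PySem.Str.replace result kv.1 kv.2) fmt

-- ===== PORT B =====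
-- Source B's while loop: one left-to-right pass, tokens tried longest-first at each position
def scanB : List Char → List Char
  | 'y'::'y'::'y'::'y'::t => '%'::'Y'::scanB t
  | 'y'::'y'::t => '%'::'y'::scanB t
  | 'm'::'m'::t => '%'::'m'::scanB t
  | 'd'::'d'::t => '%'::'d'::scanB t
  | 'H'::'H'::t => '%'::'H'::scanB t
  | 'M'::'M'::t => '%'::'M'::scanB t
  | 'S'::'S'::t => '%'::'S'::scanB t
  | c::t => c::scanB t
  | [] => []

def normalize_date_format_alt (fmt : String) : String :=
  String.ofList (scanB fmt.toList)

-- ===== PRECONDITION & SPEC =====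
def Spec_normalize_date_format (fmt : String) (out : String) : Prop := out = normalize_date_format_alt fmt
instance (fmt : String) (out : String) : Decidable (Spec_normalize_date_format fmt out) := by unfold Spec_normalize_date_format; infer_instance

-- ===== CLAIM (what is proved, stated in full; the proofs are below) =====
def Claim_equal_normalize_date_format : Prop := ∀ (fmt : String), Dom_normalize_date_format fmt → Spec_normalize_date_format fmt (normalize_date_format fmt)

-- ===== LEMMAS AND PROOFS =====

-- structural characterization of PySem.Chars.replace for a nonempty pattern
def repRec (old new : List Char) : List Char → List Char
  | [] => []
  | c :: t =>
    if old.isPrefixOf (c :: t) then new ++ repRec old new (t.drop (old.length - 1))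
    else c :: repRec old new t
termination_by l => l.length
decreasing_by
  · simp only [List.length_drop, List.length_cons]; omega
  · simp

-- sequential application of a list of (pattern, replacement) passes
def rreps : List (List Char × List Char) → List Char → List Char
  | [], l => l
  | p :: ps, l => rreps ps (repRec p.1 p.2 l)

-- A's seven passes, in A's dict order
def pvPats : List (List Char × List Char) :=
  [(['y','y','y','y'], ['%','Y']), (['y','y'], ['%','y']), (['m','m'], ['%','m']),
   (['d','d'], ['%','d']), (['H','H'], ['%','H']), (['M','M'], ['%','M']), (['S','S'], ['%','S'])]

lemma repRec_cons_ne {x : Char} (o v : List Char) {c : Char} (t : List Char) (h : ¬ x = c) :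
  repRec (x::o) v (c::t) = c :: repRec (x::o) v t := by
  rw [repRec]
  simp [List.isPrefixOf, h]

lemma rreps_push (ps : List (List Char × List Char)) (c : Char) (R : List Char)
  (h : ps.all (fun p => !p.1.isEmpty && !(p.1.head? == some c)) = true) :
  rreps ps (c :: R) = c :: rreps ps R := by
  induction ps generalizing R with
  | nil => rfl
  | cons p ps ih =>
    simp only [List.all_cons, Bool.and_eq_true, Bool.not_eq_true'] at h
    obtain ⟨⟨h1, h2⟩, h3⟩ := h
    cases hp : p.1 with
    | nil => rw [hp] at h1; simp at h1
    | cons x o =>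
      rw [rreps, rreps, hp, repRec_cons_ne o p.2 R (by rw [hp] at h2; simp at h2; exact h2)]
      exact ih _ h3

lemma repRec_head (x : Char) (o v : List Char) (l : List Char) :
  (repRec (x::o) ('%'::v) l).head? = l.head? ∨ (repRec (x::o) ('%'::v) l).head? = some '%' := by
  cases l with
  | nil => left; rw [repRec]
  | cons c t =>
    rw [repRec]
    split
    · right; rfl
    · left; rfl

lemma rreps_head (ps : List (List Char × List Char)) (l : List Char)
  (h : ps.all (fun p => !p.1.isEmpty && (p.2.head? == some '%')) = true) :
  (rreps ps l).head? = l.head? ∨ (rreps ps l).head? = some '%' := by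
  induction ps generalizing l with
  | nil => left; rfl
  | cons p ps ih =>
    simp only [List.all_cons, Bool.and_eq_true, Bool.not_eq_true'] at h
    obtain ⟨⟨h1, h2⟩, h3⟩ := h
    cases hp : p.1 with
    | nil => rw [hp] at h1; simp at h1
    | cons x o =>
      cases hv : p.2 with
      | nil => rw [hv] at h2; simp at h2
      | cons v0 vs =>
        have hv0 : v0 = '%' := by rw [hv] at h2; simp at h2; omega
        subst hv0
        rw [rreps, hp, hv]
        rcases ih (repRec (x::o) ('%'::vs) l) h3 with hA | hA
        · rcases repRec_head x o vs l with hB | hB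
          · left; rw [hA, hB]
          · right; rw [hA, hB]
        · right; exact hA

lemma go_eq (old new : List Char) (hold : old ≠ []) :
  ∀ (fuel : Nat) (l acc : List Char), l.length ≤ fuel →
    PySem.Chars.replace.go old new fuel l acc = acc.reverse ++ repRec old new l := by
  intro fuel
  induction fuel with
  | zero =>
    intro l acc h
    have hl : l = [] := by cases l with | nil => rfl | cons a b => simp at h
    subst hl
    show acc.reverse ++ [] = acc.reverse ++ repRec old new []
    rw [repRec]
  | succ n ih =>
    intro l acc h
    cases l with
    | nil =>
      show acc.reverse = acc.reverse ++ repRec old new []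
      rw [repRec]; simp
    | cons c t =>
      show (if old.isPrefixOf (c :: t) then
              PySem.Chars.replace.go old new n (List.drop old.length (c :: t)) (new.reverse ++ acc)
            else PySem.Chars.replace.go old new n t (c :: acc)) = _
      rw [repRec]
      split
      · have h1 : old.length ≥ 1 := by
          cases old with | nil => exact absurd rfl hold | cons a b => simp
        have hd : List.drop old.length (c :: t) = t.drop (old.length - 1) := by
          conv_lhs => rw [show old.length = old.length - 1 + 1 by omega]
          rw [List.drop_succ_cons]
        rw [hd, ih _ _ (by simp only [List.length_drop, List.length_cons] at h ⊢; omega)]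
        simp
      · rw [ih _ _ (by simp only [List.length_cons] at h; omega)]
        simp

lemma chars_replace_eq (s old new : List Char) (h : old ≠ []) :
  PySem.Chars.replace s old new = repRec old new s := by
  rw [PySem.Chars.replace]
  rw [if_neg (by simp [List.isEmpty_iff, h])]
  rw [go_eq old new h s.length s [] le_rfl]
  rfl

lemma rreps_append (ps qs : List (List Char × List Char)) (l : List Char) :
  rreps (ps ++ qs) l = rreps qs (rreps ps l) := by
  induction ps generalizing l with
  | nil => rfl
  | cons p ps ih => rw [List.cons_append, rreps, rreps]; exact ih _

lemma isPrefixOf_false_of_head (x : Char) (o R : List Char) (h : R.head? ≠ some x) :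
  (x::o).isPrefixOf R = false := by
  cases R with
  | nil => rfl
  | cons c t =>
    have hne : ¬ x = c := by intro he; exact h (by rw [he]; rfl)
    simp [List.isPrefixOf, hne]

lemma repRec_single_headne (x : Char) (o v W : List Char) (h : W.head? ≠ some x) :
  repRec (x::x::o) v (x::W) = x :: repRec (x::x::o) v W := by
  rw [repRec]
  simp [List.isPrefixOf, isPrefixOf_false_of_head x o W h]

lemma repRec_pair_hit (x a b : Char) (X : List Char) :
  repRec [x,x] [a,b] (x::x::X) = a::b::repRec [x,x] [a,b] X := by
  rw [repRec]
  simp [List.isPrefixOf]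

-- a pair token x,x hit at the head of the string, through the whole chain
lemma pair_hit (pre post : List (List Char × List Char)) (x cd : Char) (t : List Char)
  (hpre : pre.all (fun p => !p.1.isEmpty && !(p.1.head? == some x)) = true)
  (hp1 : post.all (fun p => !p.1.isEmpty && !(p.1.head? == some '%')) = true)
  (hp2 : post.all (fun p => !p.1.isEmpty && !(p.1.head? == some cd)) = true) :
  rreps (pre ++ ([x,x],['%',cd]) :: post) (x::x::t) =
    '%'::cd::rreps (pre ++ ([x,x],['%',cd]) :: post) t := by
  rw [rreps_append, rreps_append, rreps_push pre x _ hpre, rreps_push pre x _ hpre]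
  rw [rreps, rreps]
  show rreps post (repRec [x,x] ['%',cd] (x::x::rreps pre t)) = _
  rw [repRec_pair_hit x '%' cd (rreps pre t)]
  rw [rreps_push post '%' _ hp1, rreps_push post cd _ hp2]

-- a lone token letter x (next char differs), through the whole chain
lemma pair_ne (pre post : List (List Char × List Char)) (x cd : Char) (t : List Char)
  (hpre : pre.all (fun p => !p.1.isEmpty && !(p.1.head? == some x)) = true)
  (hpreH : pre.all (fun p => !p.1.isEmpty && (p.2.head? == some '%')) = true)
  (hpostx : post.all (fun p => !p.1.isEmpty && !(p.1.head? == some x)) = true)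
  (hx : ¬ x = '%')
  (hth : t.head? ≠ some x) :
  rreps (pre ++ ([x,x],['%',cd]) :: post) (x::t) =
    x :: rreps (pre ++ ([x,x],['%',cd]) :: post) t := by
  rw [rreps_append, rreps_append, rreps_push pre x _ hpre]
  have hW : (rreps pre t).head? ≠ some x := by
    rcases rreps_head pre t hpreH with hB | hB
    · rw [hB]; exact hth
    · rw [hB]; intro he; exact hx (by injection he with he'; rw [he'])
  rw [rreps, rreps]
  show rreps post (repRec [x,x] ['%',cd] (x::rreps pre t)) = _
  rw [repRec_single_headne x [] ['%',cd] (rreps pre t) hW]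
  rw [rreps_push post x _ hpostx]

theorem chain_eq_scan (l : List Char) : rreps pvPats l = scanB l := by
  induction l using scanB.induct with
  | case1 t ih =>
    rw [scanB.eq_1, ← ih]
    have hit : repRec ['y','y','y','y'] ['%','Y'] ('y'::'y'::'y'::'y'::t)
        = '%'::'Y'::repRec ['y','y','y','y'] ['%','Y'] t := by
      rw [repRec]; simp [List.isPrefixOf]
    show rreps [(['y','y'], ['%','y']), (['m','m'], ['%','m']), (['d','d'], ['%','d']),
                (['H','H'], ['%','H']), (['M','M'], ['%','M']), (['S','S'], ['%','S'])]
          (repRec ['y','y','y','y'] ['%','Y'] ('y'::'y'::'y'::'y'::t))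
        = '%'::'Y'::rreps [(['y','y'], ['%','y']), (['m','m'], ['%','m']), (['d','d'], ['%','d']),
                (['H','H'], ['%','H']), (['M','M'], ['%','M']), (['S','S'], ['%','S'])]
          (repRec ['y','y','y','y'] ['%','Y'] t)
    rw [hit, rreps_push _ _ _ (by decide), rreps_push _ _ _ (by decide)]
  | case2 t h ih =>
    rw [scanB.eq_2 t h, ← ih]
    have k2 : (['y','y'].isPrefixOf t) = false := by
      by_contra hq
      rw [Bool.not_eq_false] at hq
      obtain ⟨r, hr⟩ := List.isPrefixOf_iff_prefix.mp hq
      exact h r hr.symm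
    have k3 : (['y','y','y'].isPrefixOf t) = false := by
      by_contra hq
      rw [Bool.not_eq_false] at hq
      obtain ⟨r, hr⟩ := List.isPrefixOf_iff_prefix.mp hq
      exact h ('y'::r) (by rw [← hr]; rfl)
    have a1 : repRec ['y','y','y','y'] ['%','Y'] ('y'::t) = 'y' :: repRec ['y','y','y','y'] ['%','Y'] t := by
      rw [repRec]; simp [List.isPrefixOf, k3]
    have a2 : repRec ['y','y','y','y'] ['%','Y'] ('y'::'y'::t)
        = 'y'::'y'::repRec ['y','y','y','y'] ['%','Y'] t := by
      rw [repRec]; simp [List.isPrefixOf, k2, a1]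
    show rreps ([] ++ (['y','y'],['%','y']) :: [(['m','m'], ['%','m']), (['d','d'], ['%','d']),
                (['H','H'], ['%','H']), (['M','M'], ['%','M']), (['S','S'], ['%','S'])])
          (repRec ['y','y','y','y'] ['%','Y'] ('y'::'y'::t))
        = '%'::'y'::rreps ([] ++ (['y','y'],['%','y']) :: [(['m','m'], ['%','m']), (['d','d'], ['%','d']),
                (['H','H'], ['%','H']), (['M','M'], ['%','M']), (['S','S'], ['%','S'])])
          (repRec ['y','y','y','y'] ['%','Y'] t)
    rw [a2]
    exact pair_hit [] _ 'y' 'y' _ (by decide) (by decide) (by decide)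
  | case3 t ih =>
    rw [scanB.eq_3, ← ih]
    show rreps ([(['y','y','y','y'], ['%','Y']), (['y','y'], ['%','y'])] ++ (['m','m'],['%','m']) ::
          [(['d','d'], ['%','d']), (['H','H'], ['%','H']), (['M','M'], ['%','M']), (['S','S'], ['%','S'])])
          ('m'::'m'::t) = '%'::'m'::rreps _ t
    exact pair_hit _ _ 'm' 'm' t (by decide) (by decide) (by decide)
  | case4 t ih =>
    rw [scanB.eq_4, ← ih]
    show rreps ([(['y','y','y','y'], ['%','Y']), (['y','y'], ['%','y']), (['m','m'], ['%','m'])]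
          ++ (['d','d'],['%','d']) ::
          [(['H','H'], ['%','H']), (['M','M'], ['%','M']), (['S','S'], ['%','S'])])
          ('d'::'d'::t) = '%'::'d'::rreps _ t
    exact pair_hit _ _ 'd' 'd' t (by decide) (by decide) (by decide)
  | case5 t ih =>
    rw [scanB.eq_5, ← ih]
    show rreps ([(['y','y','y','y'], ['%','Y']), (['y','y'], ['%','y']), (['m','m'], ['%','m']),
          (['d','d'], ['%','d'])] ++ (['H','H'],['%','H']) ::
          [(['M','M'], ['%','M']), (['S','S'], ['%','S'])])
          ('H'::'H'::t) = '%'::'H'::rreps _ t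
    exact pair_hit _ _ 'H' 'H' t (by decide) (by decide) (by decide)
  | case6 t ih =>
    rw [scanB.eq_6, ← ih]
    show rreps ([(['y','y','y','y'], ['%','Y']), (['y','y'], ['%','y']), (['m','m'], ['%','m']),
          (['d','d'], ['%','d']), (['H','H'], ['%','H'])] ++ (['M','M'],['%','M']) ::
          [(['S','S'], ['%','S'])])
          ('M'::'M'::t) = '%'::'M'::rreps _ t
    exact pair_hit _ _ 'M' 'M' t (by decide) (by decide) (by decide)
  | case7 t ih =>
    rw [scanB.eq_7, ← ih]
    show rreps ([(['y','y','y','y'], ['%','Y']), (['y','y'], ['%','y']), (['m','m'], ['%','m']),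
          (['d','d'], ['%','d']), (['H','H'], ['%','H']), (['M','M'], ['%','M'])]
          ++ (['S','S'],['%','S']) :: [])
          ('S'::'S'::t) = '%'::'S'::rreps _ t
    exact pair_hit _ _ 'S' 'S' t (by decide) (by decide) (by decide)
  | case8 c t h1 h2 h3 h4 h5 h6 h7 ih =>
    rw [scanB.eq_8 c t h1 h2 h3 h4 h5 h6 h7, ← ih]
    by_cases hy : c = 'y'
    · subst hy
      have hth : t.head? ≠ some 'y' := by
        cases t with
        | nil => simp
        | cons c2 t2 =>
          simp only [List.head?_cons, ne_eq, Option.some.injEq]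
          intro he
          exact h2 t2 rfl (by rw [he])
      have k3 : (['y','y','y'].isPrefixOf t) = false :=
        isPrefixOf_false_of_head 'y' ['y','y']  t hth
      have a1 : repRec ['y','y','y','y'] ['%','Y'] ('y'::t) = 'y' :: repRec ['y','y','y','y'] ['%','Y'] t := by
        rw [repRec]; simp [List.isPrefixOf, k3]
      have hW : (repRec ['y','y','y','y'] ['%','Y'] t).head? ≠ some 'y' := by
        rcases repRec_head 'y' ['y','y','y'] ['Y'] t with hB | hB
        · rw [hB]; exact hth
        · rw [hB]; simp
      show rreps ((['y','y'],['%','y']) ::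
            [(['m','m'], ['%','m']), (['d','d'], ['%','d']), (['H','H'], ['%','H']),
             (['M','M'], ['%','M']), (['S','S'], ['%','S'])])
            (repRec ['y','y','y','y'] ['%','Y'] ('y'::t))
          = 'y' :: rreps ((['y','y'],['%','y']) ::
            [(['m','m'], ['%','m']), (['d','d'], ['%','d']), (['H','H'], ['%','H']),
             (['M','M'], ['%','M']), (['S','S'], ['%','S'])])
            (repRec ['y','y','y','y'] ['%','Y'] t)
      rw [a1, rreps, rreps]
      show rreps [(['m','m'], ['%','m']), (['d','d'], ['%','d']), (['H','H'], ['%','H']),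
             (['M','M'], ['%','M']), (['S','S'], ['%','S'])]
            (repRec ['y','y'] ['%','y'] ('y'::repRec ['y','y','y','y'] ['%','Y'] t)) = _
      rw [repRec_single_headne 'y' [] ['%','y'] _ hW]
      exact rreps_push _ 'y' _ (by decide)
    · by_cases hm : c = 'm'
      · subst hm
        have hth : t.head? ≠ some 'm' := by
          cases t with
          | nil => simp
          | cons c2 t2 =>
            simp only [List.head?_cons, ne_eq, Option.some.injEq]
            intro he
            exact h3 t2 rfl (by rw [he])
        show rreps ([(['y','y','y','y'], ['%','Y']), (['y','y'], ['%','y'])] ++ (['m','m'],['%','m']) ::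
              [(['d','d'], ['%','d']), (['H','H'], ['%','H']), (['M','M'], ['%','M']),
               (['S','S'], ['%','S'])]) ('m'::t) = 'm' :: rreps _ t
        exact pair_ne _ _ 'm' 'm' t (by decide) (by decide) (by decide) (by decide) hth
      · by_cases hd : c = 'd'
        · subst hd
          have hth : t.head? ≠ some 'd' := by
            cases t with
            | nil => simp
            | cons c2 t2 =>
              simp only [List.head?_cons, ne_eq, Option.some.injEq]
              intro he
              exact h4 t2 rfl (by rw [he])
          show rreps ([(['y','y','y','y'], ['%','Y']), (['y','y'], ['%','y']), (['m','m'], ['%','m'])]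
                ++ (['d','d'],['%','d']) ::
                [(['H','H'], ['%','H']), (['M','M'], ['%','M']), (['S','S'], ['%','S'])])
                ('d'::t) = 'd' :: rreps _ t
          exact pair_ne _ _ 'd' 'd' t (by decide) (by decide) (by decide) (by decide) hth
        · by_cases hH : c = 'H'
          · subst hH
            have hth : t.head? ≠ some 'H' := by
              cases t with
              | nil => simp
              | cons c2 t2 =>
                simp only [List.head?_cons, ne_eq, Option.some.injEq]
                intro he
                exact h5 t2 rfl (by rw [he])
            show rreps ([(['y','y','y','y'], ['%','Y']), (['y','y'], ['%','y']), (['m','m'], ['%','m']),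
                  (['d','d'], ['%','d'])] ++ (['H','H'],['%','H']) ::
                  [(['M','M'], ['%','M']), (['S','S'], ['%','S'])])
                  ('H'::t) = 'H' :: rreps _ t
            exact pair_ne _ _ 'H' 'H' t (by decide) (by decide) (by decide) (by decide) hth
          · by_cases hM : c = 'M'
            · subst hM
              have hth : t.head? ≠ some 'M' := by
                cases t with
                | nil => simp
                | cons c2 t2 =>
                  simp only [List.head?_cons, ne_eq, Option.some.injEq]
                  intro he
                  exact h6 t2 rfl (by rw [he])
              show rreps ([(['y','y','y','y'], ['%','Y']), (['y','y'], ['%','y']), (['m','m'], ['%','m']),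
                    (['d','d'], ['%','d']), (['H','H'], ['%','H'])] ++ (['M','M'],['%','M']) ::
                    [(['S','S'], ['%','S'])])
                    ('M'::t) = 'M' :: rreps _ t
              exact pair_ne _ _ 'M' 'M' t (by decide) (by decide) (by decide) (by decide) hth
            · by_cases hS : c = 'S'
              · subst hS
                have hth : t.head? ≠ some 'S' := by
                  cases t with
                  | nil => simp
                  | cons c2 t2 =>
                    simp only [List.head?_cons, ne_eq, Option.some.injEq]
                    intro he
                    exact h7 t2 rfl (by rw [he])
                show rreps ([(['y','y','y','y'], ['%','Y']), (['y','y'], ['%','y']), (['m','m'], ['%','m']),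
                      (['d','d'], ['%','d']), (['H','H'], ['%','H']), (['M','M'], ['%','M'])]
                      ++ (['S','S'],['%','S']) :: [])
                      ('S'::t) = 'S' :: rreps _ t
                exact pair_ne _ _ 'S' 'S' t (by decide) (by decide) (by decide) (by decide) hth
              · refine rreps_push pvPats c t ?_
                simp only [pvPats, List.all_cons, List.all_nil, Bool.and_eq_true, Bool.not_eq_true',
                  beq_eq_false_iff_ne, ne_eq]
                refine ⟨⟨rfl, ?_⟩, ⟨rfl, ?_⟩, ⟨rfl, ?_⟩, ⟨rfl, ?_⟩, ⟨rfl, ?_⟩, ⟨rfl, ?_⟩, ⟨rfl, ?_⟩, trivial⟩ <;>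
                  simp only [List.head?_cons, Option.some.injEq]
                · exact fun he => hy he.symm
                · exact fun he => hy he.symm
                · exact fun he => hm he.symm
                · exact fun he => hd he.symm
                · exact fun he => hH he.symm
                · exact fun he => hM he.symm
                · exact fun he => hS he.symm
  | case9 =>
    have hnil : ∀ ps : List (List Char × List Char), rreps ps [] = [] := by
      intro ps
      induction ps with
      | nil => rfl
      | cons p ps ih => rw [rreps, repRec]; exact ih
    rw [hnil]; rfl

lemma str_step (s old new : String) (h : old.toList ≠ []) :
  (PySem.Str.replace s old new).toList = repRec old.toList new.toList s.toList := by
  rw [PySem.Str.replace, String.toList_ofList, chars_replace_eq _ _ _ h]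

lemma A_eq (fmt : String) : normalize_date_format fmt = String.ofList (rreps pvPats fmt.toList) := by
  rw [← String.ofList_toList (s := normalize_date_format fmt)]
  apply congrArg String.ofList
  show (PySem.Str.replace (PySem.Str.replace (PySem.Str.replace (PySem.Str.replace
        (PySem.Str.replace (PySem.Str.replace (PySem.Str.replace fmt "yyyy" "%Y")
        "yy" "%y") "mm" "%m") "dd" "%d") "HH" "%H") "MM" "%M") "SS" "%S").toList = _
  rw [str_step _ _ _ (by decide), str_step _ _ _ (by decide), str_step _ _ _ (by decide),
      str_step _ _ _ (by decide), str_step _ _ _ (by decide), str_step _ _ _ (by decide),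
      str_step _ _ _ (by decide)]
  rfl

-- ===== VERDICT (by name: the statement is the Claim_ definition above) =====
theorem normalize_date_format_spec : Claim_equal_normalize_date_format := by
  intro fmt _
  unfold Spec_normalize_date_format normalize_date_format_alt
  rw [A_eq, chain_eq_scan]
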